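-- pv_equiv track=rewrite | github.com/Th0rgal/verity | scripts/generate_evmyullean_adapter_report.py | _compute_in_string_mask
-- ===== SOURCE A (Python) =====
-- def _compute_in_string_mask(code: str) -> list[bool]:
--     """Return a list the same length as ``code`` where ``mask[i]`` is True iff
--     the character at position ``i`` lies inside a Lean string literal (between
--     its opening and closing ``"`` characters). The opening and closing quotes
--     themselves are marked False so that regexes anchored on the quote character
--     keep matching legitimate short builtin-name strings like ``"add"``.
--     """
--     mask = [False] * len(code)
--     in_string = False
--     string_escape = False
--     for i, ch in enumerate(code):
--         if in_string:
--             mask[i] = True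
--             if string_escape:
--                 string_escape = False
--             elif ch == "\\":
--                 string_escape = True
--             elif ch == '"':
--                 mask[i] = False  # closing quote itself is not "inside"
--                 in_string = False
--         elif ch == '"':
--             in_string = True
--     return mask
-- ===== SOURCE B (Python) =====
-- def _compute_in_string_mask(code: str) -> list[bool]:
--     """Interval-based rewrite: jump from quote to quote and mark whole
--     interior spans at once, instead of a per-character state machine."""
--     n = len(code)
--     mask = []
--     i = 0
--     while i < n:
--         if code[i] == '"':
--             j = i + 1
--             while j < n:
--                 if code[j] == '\\':
--                     j += 2
--                 elif code[j] == '"':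
--                     break
--                 else:
--                     j += 1
--             e = min(j, n)
--             mask.append(False)
--             mask.extend([True] * (e - (i + 1)))
--             if j < n:
--                 mask.append(False)
--                 i = j + 1
--             else:
--                 i = n
--         else:
--             mask.append(False)
--             i += 1
--     return mask
-- ===== Notes on version B (the rewrite author's own statement) =====
-- stated objective: alternative
-- what changed: Replaced the per-character boolean state machine that mutates a preallocated mask with an interval scanner that jumps from opening quote to closing quote (skipping escape pairs) and appends whole False/True spans at once.
import Mathlib
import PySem

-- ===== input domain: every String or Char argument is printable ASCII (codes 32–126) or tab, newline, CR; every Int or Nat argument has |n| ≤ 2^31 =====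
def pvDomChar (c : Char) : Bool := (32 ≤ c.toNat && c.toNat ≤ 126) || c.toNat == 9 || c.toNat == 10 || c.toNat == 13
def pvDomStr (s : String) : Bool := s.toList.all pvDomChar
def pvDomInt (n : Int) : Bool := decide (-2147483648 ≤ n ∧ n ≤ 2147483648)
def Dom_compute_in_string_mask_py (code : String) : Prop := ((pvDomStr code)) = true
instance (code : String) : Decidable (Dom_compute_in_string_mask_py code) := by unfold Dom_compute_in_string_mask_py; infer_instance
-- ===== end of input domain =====

-- B marks whole string-literal spans at once (quote-to-quote jumps) instead of A's per-character state machine; objective: alternative.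

-- ===== PORT A =====
-- per-character state machine over enumerate(code), mutating a preallocated mask
def compute_in_string_mask_py (code : String) : List Bool :=
  let chars := code.toList
  let init : List Bool × Bool × Bool := (List.replicate chars.length false, false, false)
  let r := (PySem.List.enumerate chars).foldl
    (fun (s : List Bool × Bool × Bool) (p : Int × Char) =>
      let mask := s.1
      let in_string := s.2.1
      let string_escape := s.2.2
      let i := p.1
      let ch := p.2
      if in_string then
        let mask := PySem.List.pySetD mask i true
        if string_escape then (mask, in_string, false)
        else if ch = '\\' then (mask, in_string, true)
        else if ch = '"' then (PySem.List.pySetD mask i false, false, string_escape)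
        else (mask, in_string, string_escape)
      else if ch = '"' then (mask, true, string_escape)
      else (mask, in_string, string_escape)) init
  r.1

-- ===== PORT B =====
-- inner while loop of B: index of the closing quote (skipping escapes), or ≥ length
def pvFindClose (chars : List Char) (j : Nat) : Nat :=
  if h : j < chars.length then
    if chars[j] = '\\' then pvFindClose chars (j + 2)
    else if chars[j] = '"' then j
    else pvFindClose chars (j + 1)
  else j
termination_by chars.length - j

theorem pvFindClose_ge (chars : List Char) (j : Nat) : j ≤ pvFindClose chars j := by
  fun_induction pvFindClose <;> omega

-- outer while loop of B: append spans to the accumulator mask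
def pvBLoop (chars : List Char) (mask : List Bool) (i : Nat) : List Bool :=
  if h : i < chars.length then
    if chars[i] = '"' then
      let j := pvFindClose chars (i + 1)
      let e := min j chars.length
      let mask2 := (mask ++ [false]) ++ List.replicate (e - (i + 1)) true
      if _ : j < chars.length then pvBLoop chars (mask2 ++ [false]) (j + 1)
      else mask2
    else pvBLoop chars (mask ++ [false]) (i + 1)
  else mask
termination_by chars.length - i
decreasing_by
  · have := pvFindClose_ge chars (i + 1); omega
  · omega

def compute_in_string_mask_py_alt (code : String) : List Bool :=
  pvBLoop code.toList [] 0

-- ===== PRECONDITION & SPEC =====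
def Spec_compute_in_string_mask_py (code : String) (out : List Bool) : Prop := out = compute_in_string_mask_py_alt code
instance (code : String) (out : List Bool) : Decidable (Spec_compute_in_string_mask_py code out) := by unfold Spec_compute_in_string_mask_py; infer_instance

-- ===== CLAIM (what is proved, stated in full; the proofs are below) =====
def Claim_equal_compute_in_string_mask_py : Prop := ∀ (code : String), Dom_compute_in_string_mask_py code → Spec_compute_in_string_mask_py code (compute_in_string_mask_py code)

-- ===== LEMMAS AND PROOFS =====

-- reference description of the mask: state 0 = outside, 1 = inside, 2 = inside after a backslash
def pvMaskSpec (st : Nat) : List Char → List Bool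
  | [] => []
  | c :: rest =>
    if st = 0 then
      if c = '"' then false :: pvMaskSpec 1 rest else false :: pvMaskSpec 0 rest
    else if st = 1 then
      if c = '\\' then true :: pvMaskSpec 2 rest
      else if c = '"' then false :: pvMaskSpec 0 rest
      else true :: pvMaskSpec 1 rest
    else true :: pvMaskSpec 1 rest

theorem pvSet_mid (pre : List Bool) (b v : Bool) (rest : List Bool) :
    (pre ++ b :: rest).set pre.length v = pre ++ v :: rest := by
  induction pre with
  | nil => rfl
  | cons a pre ih => simp [ih]

theorem pvA_loop (chars : List Char) : ∀ (pre : List Bool) (inS esc : Bool),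
    (inS = false → esc = false) →
    ((PySem.List.enumerate chars (pre.length : Int)).foldl
      (fun (s : List Bool × Bool × Bool) (p : Int × Char) =>
        let mask := s.1
        let in_string := s.2.1
        let string_escape := s.2.2
        let i := p.1
        let ch := p.2
        if in_string then
          let mask := PySem.List.pySetD mask i true
          if string_escape then (mask, in_string, false)
          else if ch = '\\' then (mask, in_string, true)
          else if ch = '"' then (PySem.List.pySetD (mask) i false, false, string_escape)
          else (mask, in_string, string_escape)
        else if ch = '"' then (mask, true, string_escape)
        else (mask, in_string, string_escape))
      (pre ++ List.replicate chars.length false, inS, esc)).1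
    = pre ++ pvMaskSpec (if inS then (if esc then 2 else 1) else 0) chars := by
  induction chars with
  | nil =>
    intro pre inS esc h
    simp [PySem.List.enumerate_nil, pvMaskSpec]
  | cons c rest ih =>
    intro pre inS esc h
    rw [PySem.List.enumerate_cons, List.foldl_cons]
    have hlen : ((pre ++ [true]).length : Int) = (pre.length : Int) + 1 := by
      simp
    have hlenf : ((pre ++ [false]).length : Int) = (pre.length : Int) + 1 := by
      simp
    cases inS with
    | false =>
      have he := h rfl; subst he
      by_cases hc : c = '"'
      · have := ih (pre ++ [false]) true false (by simp)
        rw [hlenf] at this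
        simp only [List.length_cons, List.replicate_succ, hc] at *
        simpa [pvMaskSpec, List.append_assoc] using this
      · have := ih (pre ++ [false]) false false (by simp)
        rw [hlenf] at this
        simp only [List.length_cons, List.replicate_succ] at *
        simpa [pvMaskSpec, hc, List.append_assoc] using this
    | true =>
      cases esc with
      | true =>
        have := ih (pre ++ [true]) true false (by simp)
        rw [hlen] at this
        simp only [List.length_cons, List.replicate_succ] at *
        simpa [pvMaskSpec, pvSet_mid, List.append_assoc] using this
      | false =>
        by_cases hb : c = '\\'
        · have := ih (pre ++ [true]) true true (by simp)
          rw [hlen] at this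
          simp only [List.length_cons, List.replicate_succ, hb] at *
          simpa [pvMaskSpec, pvSet_mid, List.append_assoc] using this
        · by_cases hc : c = '"'
          · have := ih (pre ++ [false]) false false (by simp)
            rw [hlenf] at this
            simp only [List.length_cons, List.replicate_succ, hc] at *
            simpa [pvMaskSpec, hb, pvSet_mid, List.append_assoc] using this
          · have := ih (pre ++ [true]) true false (by simp)
            rw [hlen] at this
            simp only [List.length_cons, List.replicate_succ] at *
            simpa [pvMaskSpec, hb, hc, pvSet_mid, List.append_assoc] using this

theorem pvSpecIn_fc (chars : List Char) (j : Nat) :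
    pvMaskSpec 1 (chars.drop j)
      = List.replicate (min (pvFindClose chars j) chars.length - j) true
        ++ (if pvFindClose chars j < chars.length
            then false :: pvMaskSpec 0 (chars.drop (pvFindClose chars j + 1)) else []) := by
  fun_induction pvFindClose chars j with
  | case1 j h hb ih =>
    -- chars[j] = '\\'
    have hd : chars.drop j = chars[j] :: chars.drop (j + 1) := List.drop_eq_getElem_cons h
    rw [hd]
    simp only [pvMaskSpec, hb, if_true]
    by_cases h1 : j + 1 < chars.length
    · have hd2 : chars.drop (j + 1) = chars[j+1] :: chars.drop (j + 2) :=
        List.drop_eq_getElem_cons h1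
      rw [hd2]
      simp only [pvMaskSpec]
      rw [ih]
      have hge := pvFindClose_ge chars (j + 2)
      have hmin : min (pvFindClose chars (j + 2)) chars.length - j
          = (min (pvFindClose chars (j + 2)) chars.length - (j + 2)) + 2 := by omega
      rw [hmin]
      simp [List.replicate_succ]
    · have hd2 : chars.drop (j + 1) = [] := List.drop_eq_nil_of_le (by omega)
      rw [hd2]
      have hfc : pvFindClose chars (j + 2) = j + 2 := by
        rw [pvFindClose]; simp [show ¬ (j + 2 < chars.length) by omega]
      rw [hfc]
      have hmin : min (j + 2) chars.length - j = 1 := by omega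
      rw [hmin]
      simp [pvMaskSpec, show ¬ (j + 2 < chars.length) by omega]
  | case2 j h hb hq =>
    have hd : chars.drop j = chars[j] :: chars.drop (j + 1) := List.drop_eq_getElem_cons h
    rw [hd]
    simp [pvMaskSpec, hq, h, Nat.min_eq_left (le_of_lt h)]
  | case3 j h hb hq ih =>
    have hd : chars.drop j = chars[j] :: chars.drop (j + 1) := List.drop_eq_getElem_cons h
    rw [hd]
    simp only [pvMaskSpec, hb, hq, if_false]
    rw [ih]
    have hge := pvFindClose_ge chars (j + 1)
    have hmin : min (pvFindClose chars (j + 1)) chars.length - j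
        = (min (pvFindClose chars (j + 1)) chars.length - (j + 1)) + 1 := by omega
    rw [hmin]
    simp [List.replicate_succ]
  | case4 j h =>
    have hd : chars.drop j = [] := List.drop_eq_nil_of_le (by omega)
    rw [hd]
    simp only [pvMaskSpec, h, if_false]
    have : chars.length - j = 0 := by omega
    simp [Nat.min_eq_right (by omega : chars.length ≤ j), this]


theorem pvB_loop (chars : List Char) : ∀ (i : Nat) (mask : List Bool),
    pvBLoop chars mask i = mask ++ pvMaskSpec 0 (chars.drop i) := by
  intro i mask
  fun_induction pvBLoop chars mask i with
  | case1 mask i h hq j e mask2 hj ih =>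
    rw [ih]
    have hd : chars.drop i = chars[i] :: chars.drop (i + 1) := List.drop_eq_getElem_cons h
    rw [hd]
    simp only [pvMaskSpec, hq, if_true]
    rw [pvSpecIn_fc chars (i + 1)]
    simp [mask2, e, j, hj, List.append_assoc]
  | case2 mask i h hq j e mask2 hj =>
    have hd : chars.drop i = chars[i] :: chars.drop (i + 1) := List.drop_eq_getElem_cons h
    rw [hd]
    simp only [pvMaskSpec, hq, if_true]
    rw [pvSpecIn_fc chars (i + 1)]
    simp [mask2, e, j, hj, List.append_assoc]
  | case3 mask i h hq ih =>
    rw [ih]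
    have hd : chars.drop i = chars[i] :: chars.drop (i + 1) := List.drop_eq_getElem_cons h
    rw [hd]
    simp [pvMaskSpec, hq]
  | case4 mask i h =>
    have hd : chars.drop i = [] := List.drop_eq_nil_of_le (by omega)
    simp [hd, pvMaskSpec]

-- ===== VERDICT (by name: the statement is the Claim_ definition above) =====
theorem compute_in_string_mask_py_spec : Claim_equal_compute_in_string_mask_py := by
  intro code _
  show _ = _
  unfold compute_in_string_mask_py compute_in_string_mask_py_alt
  have hA := pvA_loop code.toList [] false false (fun _ => rfl)
  simp only [List.length_nil, Int.natCast_zero, List.nil_append, Bool.false_eq_true,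
    if_false] at hA
  simp only [hA, pvB_loop code.toList 0 [], List.drop_zero, List.nil_append]
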